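-- pv_equiv track=rewrite | github.com/undercmeupto/certificate-manager | certificate-manager-web/utils/certificate_checker.py | search_certificates
-- ===== SOURCE A (Python) =====
-- from typing import Optional, Tuple, Dict, List
-- from typing import List
--
-- def search_certificates(certificates: List[Dict], search_term: str = '', status_filter: str = '') -> List[Dict]:
--     """
--     搜索和过滤证件数据
--
--     Args:
--         certificates: 证件列表
--         search_term: 搜索关键词（姓名、部门、岗位、证件名称、证件号码）
--         status_filter: 状态过滤（expired/urgent/warning/normal）
--
--     Returns:
--         过滤后的证件列表
--     """
--     results = certificates
--
--     if search_term:
--         search_term = search_term.lower()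
--         results = [
--             c for c in results
--             if (search_term in c.get('name', '').lower() or
--                 search_term in c.get('department', '').lower() or
--                 search_term in c.get('position', '').lower() or
--                 search_term in c.get('certificate_name', '').lower() or
--                 search_term in c.get('certificate_number', '').lower())
--         ]
--
--     if status_filter:
--         results = [c for c in results if c.get('status') == status_filter]
--
--     return results
-- ===== SOURCE B (Python) =====
-- _FIELDS = ('name', 'department', 'position',
--            'certificate_name', 'certificate_number')
--
--
-- def search_certificates(certificates, search_term='', status_filter=''):
--     # Stage 1 (status): build a bucket index keyed by status, pick the bucket.
--     if status_filter:
--         buckets = {}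
--         for c in certificates:
--             buckets.setdefault(c.get('status'), []).append(c)
--         pool = buckets.get(status_filter, [])
--     else:
--         pool = certificates
--     # Stage 2 (search): substring test driven over a field-name table.
--     if not search_term:
--         return pool
--     t = search_term.lower()
--     return [c for c in pool
--             if any(t in c.get(f, '').lower() for f in _FIELDS)]
-- ===== Notes on version B (the rewrite author's own statement) =====
-- stated objective: alternative
-- what changed: Reversed the two stages and changed the data structure: instead of A's search comprehension followed by a status comprehension, B first builds a dict index grouping certificates by status and selects the requested bucket, then applies the substring search (driven over a field-name table) to that bucket; equality rests on the two filters commuting and the bucket index preserving order.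
import Mathlib
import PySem

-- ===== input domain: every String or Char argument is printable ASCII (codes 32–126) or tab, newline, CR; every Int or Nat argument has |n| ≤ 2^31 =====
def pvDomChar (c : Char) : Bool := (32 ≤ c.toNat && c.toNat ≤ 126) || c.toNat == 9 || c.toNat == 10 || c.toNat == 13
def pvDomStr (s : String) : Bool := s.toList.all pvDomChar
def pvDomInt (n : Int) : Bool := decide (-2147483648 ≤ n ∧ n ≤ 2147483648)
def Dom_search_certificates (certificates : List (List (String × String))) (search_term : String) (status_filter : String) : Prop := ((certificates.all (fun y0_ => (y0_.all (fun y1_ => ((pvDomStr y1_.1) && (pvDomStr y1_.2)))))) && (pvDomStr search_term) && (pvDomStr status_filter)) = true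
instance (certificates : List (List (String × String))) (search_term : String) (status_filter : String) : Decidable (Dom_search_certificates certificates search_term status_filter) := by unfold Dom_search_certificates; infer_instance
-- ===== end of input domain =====

-- B reverses the two stages with a different data structure: a dict bucket index grouped by
-- status is built and the requested bucket selected, then the substring search (over a
-- field-name table) filters that bucket; same return value as A (alternative decomposition).

-- ===== PORT A =====
def search_certificates (certificates : List (List (String × String))) (search_term : String) (status_filter : String) : List (List (String × String)) :=
  let results := certificates
  let results :=
    if search_term ≠ "" then
      let st := PySem.Str.lower search_term
      results.filter (fun c =>
        PySem.Str.isIn st (PySem.Str.lower ((PySem.Dict.mk c).getD "name" "")) ||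
        PySem.Str.isIn st (PySem.Str.lower ((PySem.Dict.mk c).getD "department" "")) ||
        PySem.Str.isIn st (PySem.Str.lower ((PySem.Dict.mk c).getD "position" "")) ||
        PySem.Str.isIn st (PySem.Str.lower ((PySem.Dict.mk c).getD "certificate_name" "")) ||
        PySem.Str.isIn st (PySem.Str.lower ((PySem.Dict.mk c).getD "certificate_number" "")))
    else results
  let results :=
    if status_filter ≠ "" then
      results.filter (fun c => (PySem.Dict.mk c).get? "status" == some status_filter)
    else results
  results

-- ===== PORT B =====
def pvFields : List String :=
  ["name", "department", "position", "certificate_name", "certificate_number"]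

def search_certificates_alt (certificates : List (List (String × String))) (search_term : String) (status_filter : String) : List (List (String × String)) :=
  -- Stage 1 (status): bucket index keyed by c.get('status') (setdefault+append = modify _ [] (· ++ [c]))
  let pool :=
    if status_filter ≠ "" then
      let buckets : PySem.Dict (Option String) (List (List (String × String))) :=
        certificates.foldl
          (fun d c => d.modify ((PySem.Dict.mk c).get? "status") [] (· ++ [c]))
          PySem.Dict.empty
      buckets.getD (some status_filter) []
    else certificates
  -- Stage 2 (search)
  if search_term = "" then pool
  else
    let t := PySem.Str.lower search_term
    pool.filter (fun c =>
      pvFields.any (fun f => PySem.Str.isIn t (PySem.Str.lower ((PySem.Dict.mk c).getD f ""))))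

-- ===== PRECONDITION & SPEC =====
def Spec_search_certificates (certificates : List (List (String × String))) (search_term : String) (status_filter : String) (out : List (List (String × String))) : Prop := out = search_certificates_alt certificates search_term status_filter
instance (certificates : List (List (String × String))) (search_term : String) (status_filter : String) (out : List (List (String × String))) : Decidable (Spec_search_certificates certificates search_term status_filter out) := by unfold Spec_search_certificates; infer_instance

-- ===== CLAIM (what is proved, stated in full; the proofs are below) =====
def Claim_equal_search_certificates : Prop := ∀ (certificates : List (List (String × String))) (search_term : String) (status_filter : String), Dom_search_certificates certificates search_term status_filter → Spec_search_certificates certificates search_term status_filter (search_certificates certificates search_term status_filter)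

-- ===== LEMMAS AND PROOFS =====

-- A's five-way disjunction, as a Bool predicate on one certificate
def pvMatch (search_term : String) (c : List (String × String)) : Bool :=
  PySem.Str.isIn (PySem.Str.lower search_term) (PySem.Str.lower ((PySem.Dict.mk c).getD "name" "")) ||
  PySem.Str.isIn (PySem.Str.lower search_term) (PySem.Str.lower ((PySem.Dict.mk c).getD "department" "")) ||
  PySem.Str.isIn (PySem.Str.lower search_term) (PySem.Str.lower ((PySem.Dict.mk c).getD "position" "")) ||
  PySem.Str.isIn (PySem.Str.lower search_term) (PySem.Str.lower ((PySem.Dict.mk c).getD "certificate_name" "")) ||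
  PySem.Str.isIn (PySem.Str.lower search_term) (PySem.Str.lower ((PySem.Dict.mk c).getD "certificate_number" ""))

-- B's field-table `any` computes exactly A's five-way disjunction
theorem pvAny_eq_match (search_term : String) (c : List (String × String)) :
    (pvFields.any (fun f =>
      PySem.Str.isIn (PySem.Str.lower search_term) (PySem.Str.lower ((PySem.Dict.mk c).getD f "")))) =
    pvMatch search_term c := by
  simp [pvFields, pvMatch, Bool.or_assoc]

-- the selected bucket of the grouping loop is the order-preserving status filter
theorem pvBucket_eq_filter (l : List (List (String × String))) (k : Option String) :
    (l.foldl (fun d c => d.modify ((PySem.Dict.mk c).get? "status") [] (· ++ [c]))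
        (PySem.Dict.empty : PySem.Dict (Option String) (List (List (String × String))))).getD k []
    = l.filter (fun c => (PySem.Dict.mk c).get? "status" == k) := by
  have h := PySem.Dict.getD_foldl_modify_append
    (l := l.map (fun c => ((PySem.Dict.mk c).get? "status", c)))
    (d := (PySem.Dict.empty : PySem.Dict (Option String) (List (List (String × String)))))
    (c := k)
  rw [List.foldl_map] at h
  simpa [List.filter_map, Function.comp_def] using h

-- ===== VERDICT (by name: the statement is the Claim_ definition above) =====
theorem search_certificates_spec : Claim_equal_search_certificates := by
  intro certs st sf _
  unfold Spec_search_certificates search_certificates search_certificates_alt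
  simp only [pvAny_eq_match]
  rw [pvBucket_eq_filter]
  by_cases hst : st = "" <;> by_cases hsf : sf = ""
  · simp [hst, hsf]
  · simp [hst, hsf]
  · simp [hst, hsf, pvMatch]
  · simp [hst, hsf, List.filter_filter, pvMatch, Bool.and_comm]
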